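-- pv_equiv track=rewrite | github.com/perezmtzdavid/uHunt | 11787.py | down
-- ===== SOURCE A (Python) =====
-- def down(hiero):
--     count_hiero = 1
--     res = hiero_values[hiero[0]]
--     for i in range(1,len(hiero)):
--         if hiero_values[hiero[i]] > hiero_values[hiero[i-1]]:
--             return "error"
--         if hiero[i] == hiero[i-1]:
--             count_hiero += 1
--             res += hiero_values[hiero[i]]
--         else:
--             res += hiero_values[hiero[i]]
--             count_hiero = 1
--         if count_hiero > 9:
--             return "error"
--     return res
--
-- hiero_values = {
--     "B": 1,
--     "U": 10,
--     "S": 100,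
--     "P": 1000,
--     "F": 10000,
--     "T": 100000,
--     "M": 1000000
-- }
-- ===== SOURCE B (Python) =====
-- hiero_values = {
--     "B": 1,
--     "U": 10,
--     "S": 100,
--     "P": 1000,
--     "F": 10000,
--     "T": 100000,
--     "M": 1000000
-- }
--
-- def down(hiero):
--     prev_val = hiero_values[hiero[0]]   # seeds the scan; empty input raises IndexError here
--     n = len(hiero)
--     res = 0
--     first = True
--     i = 0
--     while i < n:
--         j = i
--         while j < n and hiero[j] == hiero[i]:
--             j += 1
--         val = hiero_values[hiero[i]]
--         if not first and val > prev_val: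
--             return "error"
--         if j - i > 9:
--             return "error"
--         res += val * (j - i)
--         prev_val = val
--         first = False
--         i = j
--     return res
-- ===== Notes on version B (the rewrite author's own statement) =====
-- stated objective: alternative
-- what changed: Replaced the per-index loop that compares each symbol to its predecessor and maintains a running repeat counter by a run-based two-pointer scan: each maximal run of equal symbols is collapsed at once, its value looked up once, the descending rule checked once per run and value*run_length accumulated; B reproduces A exactly in Python, including the string 'error' returns, which lie outside the Lean Pre_ only because a string is not representable under the mandated Int return type.
-- outside the precondition, e.g. on down(['B', 'U']): A returns 'error', B returns 'error'; on down(['B', 'B', 'B', 'B', 'B', 'B', 'B', 'B', 'B', 'B']): A returns 'error', B returns 'error'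
import Mathlib
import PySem

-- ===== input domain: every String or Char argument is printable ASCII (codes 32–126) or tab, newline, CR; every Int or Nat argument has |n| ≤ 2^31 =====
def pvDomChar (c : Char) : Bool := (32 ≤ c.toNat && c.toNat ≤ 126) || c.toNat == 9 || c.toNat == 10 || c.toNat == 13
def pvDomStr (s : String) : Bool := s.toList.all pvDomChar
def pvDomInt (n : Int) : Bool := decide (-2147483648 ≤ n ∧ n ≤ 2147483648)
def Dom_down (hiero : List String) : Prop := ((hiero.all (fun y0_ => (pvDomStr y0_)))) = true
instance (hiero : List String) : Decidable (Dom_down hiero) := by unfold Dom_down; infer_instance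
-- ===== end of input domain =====

-- B replaces A's per-index scan (predecessor comparison + running repeat counter) by a
-- run-based two-pointer scan collapsing each maximal run at once; objective: alternative.
-- B matches A on every input in Python, including the string "error" returns and exceptions.

-- ===== PORT A =====
-- the module-level dict hiero_values; none = KeyError
def hieroVal? : String → Option Int
  | "B" => some 1
  | "U" => some 10
  | "S" => some 100
  | "P" => some 1000
  | "F" => some 10000
  | "T" => some 100000
  | "M" => some 1000000
  | _ => none

-- A's for-loop over range(1, len(hiero)), one step per fuel unit (fuel only makes the
-- recursion structural; it never runs out on the calls below);
-- none = the string "error" or a KeyError (both outside Pre_, not Int values)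
def downGoA (hiero : List String) : Nat → Nat → Int → Int → Option Int
  | 0, _, _, res => some res
  | fuel + 1, i, count, res =>
    if i < hiero.length then
      match hieroVal? (hiero.getD i ""), hieroVal? (hiero.getD (i - 1) "") with
      | some vi, some vp =>
        if vi > vp then none
        else
          let count' := if hiero.getD i "" == hiero.getD (i - 1) "" then count + 1 else 1
          if count' > 9 then none
          else downGoA hiero fuel (i + 1) count' (res + vi)
      | _, _ => none
    else some res

def down (hiero : List String) : Int :=
  match hiero with
  | [] => 0                  -- Python raises IndexError on hiero[0] (outside Pre_)
  | h :: _ =>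
    match hieroVal? h with
    | none => 0              -- KeyError (outside Pre_)
    | some v0 => (downGoA hiero hiero.length 1 1 v0).getD 0

-- ===== PORT B =====
-- B's inner while loop: first index j ≥ the start with hiero[j] ≠ hiero[i] (or the length)
def runEnd (hiero : List String) : Nat → Nat → Nat → Nat
  | 0, _, j => j
  | fuel + 1, i, j =>
    if j < hiero.length then
      if hiero.getD j "" == hiero.getD i "" then runEnd hiero fuel i (j + 1) else j
    else j

-- B's outer while loop, one run per fuel unit;
-- none = the string "error" or a KeyError (both outside Pre_, not Int values)
def downGoB (hiero : List String) : Nat → Nat → Bool → Int → Int → Option Int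
  | 0, _, _, _, res => some res
  | fuel + 1, i, first, prev, res =>
    if i < hiero.length then
      let j := runEnd hiero (hiero.length - i) i i
      match hieroVal? (hiero.getD i "") with
      | none => none
      | some v =>
        if first = false ∧ v > prev then none
        else if 9 < j - i then none
        else downGoB hiero fuel j false v (res + v * ((j - i : Nat) : Int))
    else some res

def down_alt (hiero : List String) : Int :=
  match hiero with
  | [] => 0                  -- Python raises IndexError on hiero[0] (outside Pre_)
  | h :: _ =>
    match hieroVal? h with
    | none => 0              -- KeyError (outside Pre_)
    | some pv => (downGoB hiero hiero.length 0 true pv 0).getD 0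

-- ===== PRECONDITION & SPEC =====
-- the hieroglyph value table as a total function, for stating Pre_ (0 on unknown symbols)
def hval (s : String) : Int :=
  if s = "B" then 1 else if s = "U" then 10 else if s = "S" then 100
  else if s = "P" then 1000 else if s = "F" then 10000
  else if s = "T" then 100000 else if s = "M" then 1000000 else 0

-- Pre_ excludes exactly the inputs on which Python A does not return a value of the declared
-- Int type: the empty list (IndexError), lists with a symbol outside the value table
-- (KeyError), and lists where A returns the STRING "error" (an ascending adjacent pair, or a
-- run of more than 9 equal symbols) — B reproduces that exact string in Python, but a string
-- cannot be stated as equal under the required Int return type, so those inputs lie outside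
-- the Lean claim.
def Pre_down (hiero : List String) : Prop :=
  hiero ≠ [] ∧
  (∀ s ∈ hiero, s ∈ (["B", "U", "S", "P", "F", "T", "M"] : List String)) ∧
  (∀ i ∈ List.range hiero.length, i + 1 < hiero.length →
      hval (hiero.getD (i + 1) "") ≤ hval (hiero.getD i "")) ∧
  (∀ i ∈ List.range hiero.length, i + 9 < hiero.length →
      ∃ j ∈ List.range 9, hiero.getD (i + j + 1) "" ≠ hiero.getD (i + j) "")

instance (hiero : List String) : Decidable (Pre_down hiero) := by
  unfold Pre_down; infer_instance

def pvWitness_down : List String := ["U", "B"]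

def Spec_down (hiero : List String) (out : Int) : Prop := out = down_alt hiero
instance (hiero : List String) (out : Int) : Decidable (Spec_down hiero out) := by
  unfold Spec_down; infer_instance

-- ===== CLAIM (what is proved, stated in full; the proofs are below) =====
def Claim_equal_down : Prop := ∀ (hiero : List String), Dom_down hiero → Pre_down hiero → Spec_down hiero (down hiero)

-- ===== LEMMAS AND PROOFS =====

-- suffix value sum: sum of hval over hiero[i:]
def S (hiero : List String) (i : Nat) : Int := ((hiero.drop i).map hval).sum

theorem S_stop (hiero : List String) (i : Nat) (h : hiero.length ≤ i) : S hiero i = 0 := by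
  unfold S
  rw [List.drop_eq_nil_of_le h]
  rfl

theorem S_step (hiero : List String) (i : Nat) (h : i < hiero.length) :
    S hiero i = hval (hiero.getD i "") + S hiero (i + 1) := by
  unfold S
  rw [List.drop_eq_getElem_cons h, List.getD_eq_getElem _ _ h, List.map_cons, List.sum_cons]

theorem getD_mem (hiero : List String) (i : Nat) (h : i < hiero.length) :
    hiero.getD i "" ∈ hiero := by
  rw [List.getD_eq_getElem _ _ h]; exact List.getElem_mem h

theorem hv_some (s : String) (hs : s ∈ (["B", "U", "S", "P", "F", "T", "M"] : List String)) :
    hieroVal? s = some (hval s) := by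
  fin_cases hs <;> rfl

theorem goA_eq (hiero : List String)
    (hk : ∀ s ∈ hiero, s ∈ (["B", "U", "S", "P", "F", "T", "M"] : List String))
    (hd : ∀ i ∈ List.range hiero.length, i + 1 < hiero.length →
        hval (hiero.getD (i + 1) "") ≤ hval (hiero.getD i ""))
    (hr : ∀ i ∈ List.range hiero.length, i + 9 < hiero.length →
        ∃ j ∈ List.range 9, hiero.getD (i + j + 1) "" ≠ hiero.getD (i + j) "") :
    ∀ (m i : Nat) (count res : Int), hiero.length - i ≤ m → 1 ≤ i →
      1 ≤ count → count ≤ (i : Int) →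
      (∀ jj : Nat, (jj : Int) < count → hiero.getD (i - 1 - jj) "" = hiero.getD (i - 1) "") →
      downGoA hiero m i count res = some (res + S hiero i) := by
  intro m
  induction m with
  | zero =>
    intro i count res hm hi1 hc1 hci hinv
    rw [downGoA, S_stop hiero i (by omega)]
    simp
  | succ m ih =>
    intro i count res hm hi1 hc1 hci hinv
    by_cases hi : i < hiero.length
    · have hmi := hk _ (getD_mem hiero i hi)
      have hi1' : i - 1 < hiero.length := by omega
      have hmp := hk _ (getD_mem hiero (i - 1) hi1')
      rw [downGoA, if_pos hi]
      simp only [hv_some _ hmi, hv_some _ hmp]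
      have hdesc : hval (hiero.getD i "") ≤ hval (hiero.getD (i - 1) "") := by
        have hh := hd (i - 1) (List.mem_range.mpr hi1') (by omega)
        have hii : i - 1 + 1 = i := by omega
        rwa [hii] at hh
      rw [if_neg (not_lt.mpr hdesc)]
      by_cases heq : hiero.getD i "" = hiero.getD (i - 1) ""
      · rw [if_pos (beq_iff_eq.mpr heq)]
        have hrun : ∀ jj : Nat, (jj : Int) < count + 1 →
            hiero.getD (i - jj) "" = hiero.getD i "" := by
          intro jj hjj
          match jj with
          | 0 => rfl
          | (j' + 1) =>
            have h1 := hinv j' (by omega)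
            have h2 : i - (j' + 1) = i - 1 - j' := by omega
            rw [h2, h1]
            exact heq.symm
        have hc9 : ¬ count + 1 > 9 := by
          intro hgt
          have hci9 : 9 ≤ i := by omega
          obtain ⟨j, hjmem, hjne⟩ := hr (i - 9) (List.mem_range.mpr (by omega)) (by omega)
          have hj9 : j < 9 := List.mem_range.mp hjmem
          apply hjne
          have e1 : i - 9 + j + 1 = i - (8 - j) := by omega
          have e2 : i - 9 + j = i - (9 - j) := by omega
          rw [e1, e2, hrun (8 - j) (by omega), hrun (9 - j) (by omega)]
        rw [if_neg hc9]
        rw [ih (i + 1) (count + 1) (res + hval (hiero.getD i "")) (by omega) (by omega)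
              (by omega) (by omega)
              (by
                intro jj hjj
                have e3 : i + 1 - 1 - jj = i - jj := by omega
                have e4 : i + 1 - 1 = i - 0 := by omega
                rw [e3, e4, hrun jj hjj, hrun 0 (by omega)])]
        rw [S_step hiero i hi]
        congr 1
        ring
      · rw [if_neg (fun hb => heq (eq_of_beq hb))]
        rw [if_neg (by norm_num : ¬ (1 : Int) > 9)]
        rw [ih (i + 1) 1 (res + hval (hiero.getD i "")) (by omega) (by omega) le_rfl
              (by omega)
              (by
                intro jj hjj
                have hjj0 : jj = 0 := by omega
                subst hjj0
                rfl)]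
        rw [S_step hiero i hi]
        congr 1
        ring
    · rw [downGoA, if_neg hi, S_stop hiero i (by omega)]
      simp

theorem le_runEnd (hiero : List String) :
    ∀ (fuel i j : Nat), j ≤ runEnd hiero fuel i j := by
  intro fuel
  induction fuel with
  | zero => intro i j; rw [runEnd]
  | succ fuel ih =>
    intro i j
    rw [runEnd]
    split
    · split
      · exact le_trans (Nat.le_succ j) (ih i (j + 1))
      · exact le_refl j
    · exact le_refl j

theorem lt_runEnd_self (hiero : List String) (fuel i : Nat) (hf : 1 ≤ fuel)
    (h : i < hiero.length) : i < runEnd hiero fuel i i := by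
  obtain ⟨f, rfl⟩ : ∃ f, fuel = f + 1 := ⟨fuel - 1, by omega⟩
  rw [runEnd, if_pos h, if_pos (by simp)]
  exact Nat.lt_of_lt_of_le (Nat.lt_succ_self i) (le_runEnd hiero f i (i + 1))

theorem runEnd_le_length (hiero : List String) :
    ∀ (fuel i j : Nat), j ≤ hiero.length → runEnd hiero fuel i j ≤ hiero.length := by
  intro fuel
  induction fuel with
  | zero => intro i j h; rw [runEnd]; exact h
  | succ fuel ih =>
    intro i j h
    rw [runEnd]
    split
    · split
      · exact ih i (j + 1) (by omega)
      · exact h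
    · exact h

theorem runEnd_eq_all (hiero : List String) :
    ∀ (fuel i j k : Nat), j ≤ k → k < runEnd hiero fuel i j →
      hiero.getD k "" = hiero.getD i "" := by
  intro fuel
  induction fuel with
  | zero => intro i j k hjk hk; rw [runEnd] at hk; omega
  | succ fuel ih =>
    intro i j k hjk hk
    rw [runEnd] at hk
    by_cases hj : j < hiero.length
    · rw [if_pos hj] at hk
      by_cases heq : (hiero.getD j "" == hiero.getD i "") = true
      · rw [if_pos heq] at hk
        rcases Nat.eq_or_lt_of_le hjk with rfl | hlt
        · exact eq_of_beq heq
        · exact ih i (j + 1) k hlt hk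
      · rw [if_neg heq] at hk; omega
    · rw [if_neg hj] at hk; omega

theorem sum_run (hiero : List String) (v : Int) :
    ∀ (d i : Nat), i + d ≤ hiero.length →
      (∀ k, i ≤ k → k < i + d → hval (hiero.getD k "") = v) →
      S hiero i = v * (d : Int) + S hiero (i + d) := by
  intro d
  induction d with
  | zero => intro i _ _; simp
  | succ d ih =>
    intro i hle hall
    have hi : i < hiero.length := by omega
    rw [S_step hiero i hi, hall i le_rfl (by omega),
        ih (i + 1) (by omega) (fun k hk1 hk2 => hall k (by omega) (by omega))]
    have e : i + 1 + d = i + (d + 1) := by omega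
    rw [e]
    push_cast
    ring

theorem goB_eq (hiero : List String)
    (hk : ∀ s ∈ hiero, s ∈ (["B", "U", "S", "P", "F", "T", "M"] : List String))
    (hd : ∀ i ∈ List.range hiero.length, i + 1 < hiero.length →
        hval (hiero.getD (i + 1) "") ≤ hval (hiero.getD i ""))
    (hr : ∀ i ∈ List.range hiero.length, i + 9 < hiero.length →
        ∃ j ∈ List.range 9, hiero.getD (i + j + 1) "" ≠ hiero.getD (i + j) "") :
    ∀ (m i : Nat) (first : Bool) (prev res : Int), hiero.length - i ≤ m → i ≤ hiero.length →
      (first = false → 1 ≤ i ∧ prev = hval (hiero.getD (i - 1) "")) →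
      downGoB hiero m i first prev res = some (res + S hiero i) := by
  intro m
  induction m with
  | zero =>
    intro i first prev res hm hin hfst
    rw [downGoB, S_stop hiero i (by omega)]
    simp
  | succ m ih =>
    intro i first prev res hm hin hfst
    by_cases hi : i < hiero.length
    · rw [downGoB, if_pos hi]
      simp only [hv_some _ (hk _ (getD_mem hiero i hi))]
      have hij : i < runEnd hiero (hiero.length - i) i i :=
        lt_runEnd_self hiero (hiero.length - i) i (by omega) hi
      have hjle : runEnd hiero (hiero.length - i) i i ≤ hiero.length :=
        runEnd_le_length hiero (hiero.length - i) i i (le_of_lt hi)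
      have hall : ∀ k, i ≤ k → k < runEnd hiero (hiero.length - i) i i →
          hiero.getD k "" = hiero.getD i "" :=
        fun k h1 h2 => runEnd_eq_all hiero (hiero.length - i) i i k h1 h2
      have hnc : ¬ (first = false ∧ hval (hiero.getD i "") > prev) := by
        rintro ⟨hf, hgt⟩
        obtain ⟨hi1, hprev⟩ := hfst hf
        have hle : hval (hiero.getD i "") ≤ hval (hiero.getD (i - 1) "") := by
          have hh := hd (i - 1) (List.mem_range.mpr (by omega)) (by omega)
          have hii : i - 1 + 1 = i := by omega
          rwa [hii] at hh
        rw [hprev] at hgt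
        omega
      rw [if_neg hnc]
      have hr9 : ¬ 9 < runEnd hiero (hiero.length - i) i i - i := by
        intro hgt
        obtain ⟨jj, hjjmem, hjjne⟩ := hr i (List.mem_range.mpr hi) (by omega)
        have hjj9 : jj < 9 := List.mem_range.mp hjjmem
        exact hjjne (by rw [hall (i + jj + 1) (by omega) (by omega),
                            hall (i + jj) (by omega) (by omega)])
      rw [if_neg hr9]
      rw [ih (runEnd hiero (hiero.length - i) i i) false (hval (hiero.getD i ""))
            (res + hval (hiero.getD i "") * ((runEnd hiero (hiero.length - i) i i - i : Nat) : Int))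
            (by omega) hjle
            (by
              intro _
              exact ⟨by omega, congrArg hval ((hall (runEnd hiero (hiero.length - i) i i - 1)
                (by omega) (by omega)).symm)⟩)]
      rw [sum_run hiero (hval (hiero.getD i "")) (runEnd hiero (hiero.length - i) i i - i) i
            (by omega) (fun k h1 h2 => by rw [hall k h1 (by omega)])]
      have e : i + (runEnd hiero (hiero.length - i) i i - i) = runEnd hiero (hiero.length - i) i i := by
        omega
      rw [e]
      congr 1
      ring
    · rw [downGoB, if_neg hi, S_stop hiero i (by omega)]
      simp

-- ===== VERDICT (by name: the statement is the Claim_ definition above) =====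
theorem down_spec : Claim_equal_down := by
  intro hiero _ hpre
  unfold Spec_down
  obtain ⟨hne, hk, hd, hr⟩ := hpre
  obtain - | ⟨h, t⟩ := hiero
  · exact absurd rfl hne
  · have hlen : 0 < (h :: t).length := by simp
    have hh : h ∈ h :: t := List.mem_cons_self
    have hv0 : hieroVal? h = some (hval h) := hv_some h (hk h hh)
    have hA : downGoA (h :: t) (h :: t).length 1 1 (hval h) = some (hval h + S (h :: t) 1) := by
      refine goA_eq (h :: t) hk hd hr ((h :: t).length) 1 1 (hval h) (by omega) le_rfl
        le_rfl (by exact_mod_cast le_refl 1) ?_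
      intro jj hjj
      have hjj0 : jj = 0 := by omega
      subst hjj0; rfl
    have hB : downGoB (h :: t) (h :: t).length 0 true (hval h) 0 = some (0 + S (h :: t) 0) := by
      refine goB_eq (h :: t) hk hd hr ((h :: t).length) 0 true (hval h) 0 (by omega)
        (by omega) (by intro hc; cases hc)
    have hS0 : S (h :: t) 0 = hval h + S (h :: t) 1 := by
      have := S_step (h :: t) 0 hlen
      simpa using this
    simp only [down, down_alt, hv0, hA, hB, hS0, Option.getD_some, zero_add]
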